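-- pv_equiv track=rewrite | github.com/pypi-data/pypi-mirror-390 | packages/blue-platform/blue_platform-1.0.tar.gz/blue_platform-1.0/src/blue/operators/insert_operator.py | _build_result_with_multiple_inserts
-- ===== SOURCE A (Python) =====
-- from typing import List, Dict, Any, Callable, Union
--
-- def _build_result_with_multiple_inserts(base_data: List[Dict[str, Any]], insert_records: List[Dict[str, Any]], insert_positions: List[int]) -> List[Dict[str, Any]]:
--     """Build result with multiple inserts efficiently."""
--     base_len = len(base_data)
--
--     # Group records by position
--     position_to_records = {}
--     append_records = []
--
--     for record, pos in zip(insert_records, insert_positions):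
--         if pos < 0 or pos > base_len:
--             append_records.append(record)
--         else:
--             if pos not in position_to_records:
--                 position_to_records[pos] = []
--             position_to_records[pos].append(record)
--
--     # Build result
--     result = []
--
--     for i in range(base_len):
--         if i in position_to_records:
--             result.extend(position_to_records[i])
--         result.append(base_data[i])
--
--     # Handle end position
--     if base_len in position_to_records:
--         result.extend(position_to_records[base_len])
--
--     # Append invalid positions
--     result.extend(append_records)
--
--     return result
-- ===== SOURCE B (Python) =====
-- def _build_result_with_multiple_inserts(base_data, insert_records, insert_positions):
--     """Build result with multiple inserts: stable sort of valid (pos, record)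
--     pairs plus a single merge pass with a pointer, instead of a dict index."""
--     n = len(base_data)
--     valid = []
--     invalid = []
--     for record, pos in zip(insert_records, insert_positions):
--         if 0 <= pos <= n:
--             valid.append((pos, record))
--         else:
--             invalid.append((pos, record))
--     valid.sort(key=lambda t: t[0])  # stable, keyed on position only
--     result = []
--     j = 0
--     for i, row in enumerate(base_data):
--         while j < len(valid) and valid[j][0] == i:
--             result.append(valid[j][1])
--             j += 1
--         result.append(row)
--     result.extend(rec for _, rec in valid[j:])
--     result.extend(rec for _, rec in invalid)
--     return result
-- ===== Notes on version B (the rewrite author's own statement) =====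
-- stated objective: alternative
-- what changed: Replaces the position-keyed dict grouping and per-index dict lookups with a partition into valid/invalid (pos, record) pairs, a stable sort by position, and a single merge pass with a pointer over the sorted pairs.
import Mathlib
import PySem

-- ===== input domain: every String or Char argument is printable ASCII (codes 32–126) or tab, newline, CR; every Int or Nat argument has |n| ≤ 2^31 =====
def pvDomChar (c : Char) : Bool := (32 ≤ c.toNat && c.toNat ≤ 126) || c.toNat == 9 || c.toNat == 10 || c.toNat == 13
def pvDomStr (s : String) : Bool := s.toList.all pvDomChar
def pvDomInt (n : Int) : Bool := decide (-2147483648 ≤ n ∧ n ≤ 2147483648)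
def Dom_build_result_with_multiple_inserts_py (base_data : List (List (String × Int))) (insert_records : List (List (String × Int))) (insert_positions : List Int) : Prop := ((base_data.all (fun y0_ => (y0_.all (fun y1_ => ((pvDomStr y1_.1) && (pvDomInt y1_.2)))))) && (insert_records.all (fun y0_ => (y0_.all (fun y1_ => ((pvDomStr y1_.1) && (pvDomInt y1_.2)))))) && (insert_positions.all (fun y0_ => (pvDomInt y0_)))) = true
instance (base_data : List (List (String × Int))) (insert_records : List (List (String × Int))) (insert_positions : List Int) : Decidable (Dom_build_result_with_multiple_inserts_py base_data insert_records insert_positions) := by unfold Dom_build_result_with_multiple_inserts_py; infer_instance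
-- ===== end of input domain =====

-- ===== PORT A =====
-- B replaces A's dict-of-positions grouping by a stable sort of valid (pos, record)
-- pairs plus one merge pass with a pointer (objective: alternative decomposition).

-- record type of one "dict" row
abbrev pvRec : Type := List (String × Int)

-- A's grouping loop body: state = (position_to_records, append_records)
def pvStepA (n : Int) (s : PySem.Dict Int (List pvRec) × List pvRec) (p : pvRec × Int) :
    PySem.Dict Int (List pvRec) × List pvRec :=
  if p.2 < 0 ∨ n < p.2 then (s.1, s.2 ++ [p.1])
  else (s.1.modify p.2 [] (fun l => l ++ [p.1]), s.2)

def build_result_with_multiple_inserts_py (base_data : List (List (String × Int))) (insert_records : List (List (String × Int))) (insert_positions : List Int) : List (List (String × Int)) :=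
  let base_len : Int := (base_data.length : Int)
  let s := (insert_records.zip insert_positions).foldl (pvStepA base_len) (PySem.Dict.empty, [])
  -- for i in range(base_len): …  (base_data[i] via pyGetD: i is always in range here, so the
  -- default [] is never used and the indexing is exact)
  let result := (PySem.List.pyRange 0 base_len).foldl
    (fun acc i => (if s.1.contains i then acc ++ s.1.getD i [] else acc)
                    ++ [PySem.List.pyGetD base_data i []]) []
  let result := if s.1.contains base_len then result ++ s.1.getD base_len [] else result
  result ++ s.2

-- ===== PORT B =====
-- B's partition loop body: state = (valid, invalid) lists of (pos, record) pairs
def pvStepB (n : Int) (s : List (Int × pvRec) × List (Int × pvRec)) (p : pvRec × Int) :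
    List (Int × pvRec) × List (Int × pvRec) :=
  if 0 ≤ p.2 ∧ p.2 ≤ n then (s.1 ++ [(p.2, p.1)], s.2) else (s.1, s.2 ++ [(p.2, p.1)])

-- B's merge pass: the while loop with pointer j consumes the leading run of pairs at
-- position i (takeWhile/dropWhile = the pointer advance), then emits the base row
def pvMergeB : List (Int × pvRec) → List pvRec → Int → List pvRec
  | sv, [], _ => sv.map (fun t => t.2)
  | sv, r :: rest, i =>
      (sv.takeWhile (fun t => t.1 == i)).map (fun t => t.2)
        ++ r :: pvMergeB (sv.dropWhile (fun t => t.1 == i)) rest (i + 1)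

def build_result_with_multiple_inserts_py_alt (base_data : List (List (String × Int))) (insert_records : List (List (String × Int))) (insert_positions : List Int) : List (List (String × Int)) :=
  let n : Int := (base_data.length : Int)
  let s := (insert_records.zip insert_positions).foldl (pvStepB n) ([], [])
  let sv := PySem.List.sorted s.1 (fun t => t.1)   -- stable, keyed on position only
  pvMergeB sv base_data 0 ++ s.2.map (fun t => t.2)

-- ===== PRECONDITION & SPEC =====
def Spec_build_result_with_multiple_inserts_py (base_data : List (List (String × Int))) (insert_records : List (List (String × Int))) (insert_positions : List Int) (out : List (List (String × Int))) : Prop := out = build_result_with_multiple_inserts_py_alt base_data insert_records insert_positions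
instance (base_data : List (List (String × Int))) (insert_records : List (List (String × Int))) (insert_positions : List Int) (out : List (List (String × Int))) : Decidable (Spec_build_result_with_multiple_inserts_py base_data insert_records insert_positions out) := by unfold Spec_build_result_with_multiple_inserts_py; infer_instance

-- ===== CLAIM (what is proved, stated in full; the proofs are below) =====
def Claim_equal_build_result_with_multiple_inserts_py : Prop := ∀ (base_data : List (List (String × Int))) (insert_records : List (List (String × Int))) (insert_positions : List Int), Dom_build_result_with_multiple_inserts_py base_data insert_records insert_positions → Spec_build_result_with_multiple_inserts_py base_data insert_records insert_positions (build_result_with_multiple_inserts_py base_data insert_records insert_positions)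

-- ===== LEMMAS AND PROOFS =====

-- records of `pairs` inserted at position c, in encounter order
def pvAt (pairs : List (pvRec × Int)) (c : Int) : List pvRec :=
  (pairs.filter (fun p => p.2 == c)).map (fun p => p.1)

-- ---- A side ----

lemma pvA_snd (n : Int) (pairs : List (pvRec × Int)) (s : PySem.Dict Int (List pvRec) × List pvRec) :
    (pairs.foldl (pvStepA n) s).2
      = s.2 ++ (pairs.filter (fun p => decide (p.2 < 0) || decide (n < p.2))).map (fun p => p.1) := by
  induction pairs generalizing s with
  | nil => simp
  | cons p ps ih =>
    simp only [List.foldl_cons, List.filter_cons, pvStepA]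
    by_cases h : p.2 < 0 ∨ n < p.2
    · rw [if_pos h, ih]
      have : (decide (p.2 < 0) || decide (n < p.2)) = true := by
        rcases h with h | h <;> simp [h]
      simp [this]
    · rw [if_neg h, ih]
      have : (decide (p.2 < 0) || decide (n < p.2)) = false := by
        simp only [Bool.or_eq_false_iff, decide_eq_false_iff_not, not_lt]
        omega
      simp [this]

lemma pvA_getD (n : Int) (pairs : List (pvRec × Int)) (s : PySem.Dict Int (List pvRec) × List pvRec)
    (c : Int) (h0 : 0 ≤ c) (h1 : c ≤ n) :
    ((pairs.foldl (pvStepA n) s).1).getD c [] = s.1.getD c [] ++ pvAt pairs c := by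
  induction pairs generalizing s with
  | nil => simp [pvAt]
  | cons p ps ih =>
    simp only [List.foldl_cons, pvStepA, pvAt, List.filter_cons]
    by_cases h : p.2 < 0 ∨ n < p.2
    · rw [if_pos h, ih]
      have : (p.2 == c) = false := by simp; omega
      simp [this, pvAt]
    · rw [if_neg h, ih]
      by_cases hc : p.2 = c
      · subst hc
        rw [PySem.Dict.getD_modify_self]
        simp [pvAt]
      · rw [PySem.Dict.getD_modify_of_ne _ _ _ (Ne.symm hc)]
        have : (p.2 == c) = false := by simp [hc]
        simp [this, pvAt]

lemma pvContains_if (d : PySem.Dict Int (List pvRec)) (acc : List pvRec) (i : Int) :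
    (if d.contains i then acc ++ d.getD i [] else acc) = acc ++ d.getD i [] := by
  by_cases h : d.contains i
  · rw [if_pos h]
  · rw [if_neg h]
    simp [PySem.Dict.contains, PySem.Dict.getD, PySem.Dict.get?] at *
    rw [List.find?_eq_none.mpr]
    · simp
    · rintro ⟨a, b⟩ hq
      simp only [beq_iff_eq]
      rintro rfl
      exact h b hq

lemma pvB_fold (n : Int) (pairs : List (pvRec × Int)) (s : List (Int × pvRec) × List (Int × pvRec)) :
    pairs.foldl (pvStepB n) s
      = (s.1 ++ (pairs.filter (fun p => decide (0 ≤ p.2) && decide (p.2 ≤ n))).map (fun p => (p.2, p.1)),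
         s.2 ++ (pairs.filter (fun p => !(decide (0 ≤ p.2) && decide (p.2 ≤ n)))).map (fun p => (p.2, p.1))) := by
  induction pairs generalizing s with
  | nil => simp
  | cons p ps ih =>
    simp only [List.foldl_cons, pvStepB, List.filter_cons]
    by_cases h : 0 ≤ p.2 ∧ p.2 ≤ n
    · rw [if_pos h, ih]
      have : (decide (0 ≤ p.2) && decide (p.2 ≤ n)) = true := by simp [h.1, h.2]
      simp [this]
    · rw [if_neg h, ih]
      have : (decide (0 ≤ p.2) && decide (p.2 ≤ n)) = false := by
        rw [Classical.not_and_iff_not_or_not] at h; rcases h with h | h <;> simp [h]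
      simp [this]

-- ---- assembling the two sides ----

lemma pvInsert_pairwise (x : Int × pvRec) (acc : List (Int × pvRec))
    (h : acc.Pairwise (fun a b => a.1 ≤ b.1)) :
    (PySem.List.insertBy (fun a b => decide (a.1 < b.1)) x acc).Pairwise (fun a b => a.1 ≤ b.1) := by
  induction acc with
  | nil => simp [PySem.List.insertBy]
  | cons y ys ih =>
    rw [List.pairwise_cons] at h
    by_cases hxy : x.1 < y.1
    · simp only [PySem.List.insertBy, hxy, decide_true, if_pos]
      refine List.pairwise_cons.mpr ⟨?_, List.pairwise_cons.mpr h⟩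
      intro z hz
      rcases List.mem_cons.mp hz with rfl | hz
      · omega
      · have := h.1 z hz; omega
    · simp only [PySem.List.insertBy, hxy, decide_false, Bool.false_eq_true, if_neg, not_false_iff]
      refine List.pairwise_cons.mpr ⟨?_, ih h.2⟩
      intro z hz
      rw [PySem.List.mem_insertBy] at hz
      rcases hz with rfl | hz
      · omega
      · exact h.1 z hz

lemma pvInsert_filter (x : Int × pvRec) (acc : List (Int × pvRec)) (c : Int)
    (h : acc.Pairwise (fun a b => a.1 ≤ b.1)) :
    (PySem.List.insertBy (fun a b => decide (a.1 < b.1)) x acc).filter (fun t => t.1 == c)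
      = if x.1 = c then acc.filter (fun t => t.1 == c) ++ [x] else acc.filter (fun t => t.1 == c) := by
  induction acc with
  | nil => split_ifs with hc <;> simp [PySem.List.insertBy, hc]
  | cons y ys ih =>
    rw [List.pairwise_cons] at h
    by_cases hxy : x.1 < y.1
    · simp only [PySem.List.insertBy, hxy, decide_true, if_pos]
      by_cases hc : x.1 = c
      · have hnone : (y :: ys).filter (fun t => t.1 == c) = [] := by
          rw [List.filter_eq_nil_iff]
          intro z hz
          rcases List.mem_cons.mp hz with rfl | hz
          · simp; omega
          · have := h.1 z hz; simp; omega
        rw [if_pos hc, List.filter_cons_of_pos (by simp [hc]), hnone]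
        simp
      · rw [if_neg hc, List.filter_cons_of_neg (by simp [hc])]
    · simp only [PySem.List.insertBy, hxy, decide_false, Bool.false_eq_true, if_neg, not_false_iff]
      by_cases hyc : y.1 = c
      · rw [List.filter_cons_of_pos (by simp [hyc]), List.filter_cons_of_pos (by simp [hyc]), ih h.2]
        split_ifs <;> simp
      · rw [List.filter_cons_of_neg (by simp [hyc]), List.filter_cons_of_neg (by simp [hyc]), ih h.2]

lemma pvSorted_filter_aux (vs : List (Int × pvRec)) (c : Int) :
    ∀ acc : List (Int × pvRec), acc.Pairwise (fun a b => a.1 ≤ b.1) →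
    (vs.foldl (fun acc x => PySem.List.insertBy (fun a b => decide (a.1 < b.1)) x acc) acc).filter (fun t => t.1 == c)
      = acc.filter (fun t => t.1 == c) ++ vs.filter (fun t => t.1 == c) := by
  induction vs with
  | nil => simp
  | cons x xs ih =>
    intro acc hacc
    rw [List.foldl_cons, ih _ (pvInsert_pairwise x acc hacc), pvInsert_filter x acc c hacc]
    by_cases hc : x.1 = c
    · rw [if_pos hc, List.filter_cons_of_pos (by simp [hc])]; simp
    · rw [if_neg hc, List.filter_cons_of_neg (by simp [hc])]

lemma pvSorted_filter (vs : List (Int × pvRec)) (c : Int) :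
    (PySem.List.sorted vs (fun t => t.1)).filter (fun t => t.1 == c)
      = vs.filter (fun t => t.1 == c) := by
  rw [PySem.List.sorted_eq_foldl_insertBy, pvSorted_filter_aux vs c [] (by simp)]
  simp
lemma pvTW (sv : List (Int × pvRec)) (i : Int)
    (hs : sv.Pairwise (fun a b => a.1 ≤ b.1)) (hlo : ∀ x ∈ sv, i ≤ x.1) :
    sv.takeWhile (fun t => t.1 == i) = sv.filter (fun t => t.1 == i)
      ∧ ∀ x ∈ sv.dropWhile (fun t => t.1 == i), i + 1 ≤ x.1 := by
  induction sv with
  | nil => simp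
  | cons y ys ih =>
    rw [List.pairwise_cons] at hs
    by_cases hy : y.1 = i
    · rw [List.takeWhile_cons_of_pos (by simp [hy]), List.filter_cons_of_pos (by simp [hy]),
        List.dropWhile_cons_of_pos (by simp [hy])]
      have := ih hs.2 (fun x hx => hlo x (List.mem_cons_of_mem _ hx))
      exact ⟨by rw [this.1], this.2⟩
    · have hgt : i + 1 ≤ y.1 := by have := hlo y (by simp); omega
      rw [List.takeWhile_cons_of_neg (by simp [hy]), List.dropWhile_cons_of_neg (by simp [hy])]
      have hnil : (y :: ys).filter (fun t => t.1 == i) = [] := by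
        rw [List.filter_eq_nil_iff]
        intro z hz
        rcases List.mem_cons.mp hz with rfl | hz
        · simp [hy]
        · have := hs.1 z hz; simp; omega
      refine ⟨hnil.symm, ?_⟩
      intro x hx
      rcases List.mem_cons.mp hx with rfl | hx
      · exact hgt
      · have := hs.1 x hx; omega

lemma pvMerge_eq (base : List pvRec) : ∀ (sv : List (Int × pvRec)) (i : Int),
    sv.Pairwise (fun a b => a.1 ≤ b.1) → (∀ x ∈ sv, i ≤ x.1 ∧ x.1 ≤ i + (base.length : Int)) →
    pvMergeB sv base i
      = (List.range base.length).flatMap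
          (fun (k : Nat) => (sv.filter (fun t => t.1 == i + (k : Int))).map (fun t => t.2) ++ [base.getD k []])
        ++ (sv.filter (fun t => t.1 == i + (base.length : Int))).map (fun t => t.2) := by
  induction base with
  | nil =>
    intro sv i hs hb
    have hself : sv.filter (fun t => t.1 == i) = sv := by
      rw [List.filter_eq_self]
      intro x hx
      have := hb x hx
      simp at this ⊢
      omega
    simp only [pvMergeB, List.length_nil, List.range_zero, List.flatMap_nil, List.nil_append,
      Nat.cast_zero, add_zero, hself]
  | cons r rest ih =>
    intro sv i hs hb
    have hlo : ∀ x ∈ sv, i ≤ x.1 := fun x hx => (hb x hx).1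
    obtain ⟨htw, hdrop⟩ := pvTW sv i hs hlo
    have hsubD : ∀ x ∈ sv.dropWhile (fun t => t.1 == i), x ∈ sv :=
      fun x hx => (List.dropWhile_sublist _).subset hx
    have hD : ∀ x ∈ sv.dropWhile (fun t => t.1 == i), (i+1) ≤ x.1 ∧ x.1 ≤ (i+1) + (rest.length : Int) := by
      intro x hx
      have h1 := hdrop x hx
      have h2 := (hb x (hsubD x hx)).2
      simp at h2 ⊢
      constructor
      · exact h1
      · omega
    have hpD : (sv.dropWhile (fun t => t.1 == i)).Pairwise (fun a b => a.1 ≤ b.1) :=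
      List.Pairwise.sublist (List.dropWhile_sublist _) hs
    have hsplit : sv = sv.takeWhile (fun t => t.1 == i) ++ sv.dropWhile (fun t => t.1 == i) :=
      (List.takeWhile_append_dropWhile (p := fun t => t.1 == i) (l := sv)).symm
    -- filter of sv at a key ≠ i is filter of the dropWhile part
    have hfD : ∀ j : Int, j ≠ i → sv.filter (fun t => t.1 == j)
        = (sv.dropWhile (fun t => t.1 == i)).filter (fun t => t.1 == j) := by
      intro j hj
      conv_lhs => rw [hsplit]
      rw [List.filter_append]
      have : (sv.takeWhile (fun t => t.1 == i)).filter (fun t => t.1 == j) = [] := by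
        rw [List.filter_eq_nil_iff]
        intro z hz
        have := List.mem_takeWhile_imp hz
        simp at this ⊢
        omega
      rw [this, List.nil_append]
    have hfD' : ∀ k : Nat, sv.filter (fun t => t.1 == i + 1 + (k : Int))
        = (sv.dropWhile (fun t => t.1 == i)).filter (fun t => t.1 == i + 1 + (k : Int)) :=
      fun k => hfD _ (by omega)
    rw [pvMergeB, ih _ (i+1) hpD hD]
    simp only [List.length_cons, List.range_succ_eq_map, List.flatMap_cons, List.flatMap_map,
      Nat.succ_eq_add_one, Nat.cast_add, Nat.cast_one, Nat.cast_zero, add_zero,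
      List.getD_cons_zero, List.getD_cons_succ,
      show ∀ a : Int, i + (a + 1) = i + 1 + a from fun a => by ring, hfD', htw]
    simp [List.append_assoc]

lemma pvB_filter_at (pairs : List (pvRec × Int)) (n c : Int) (h0 : 0 ≤ c) (h1 : c ≤ n) :
    ((PySem.List.sorted ((pairs.filter (fun p => decide (0 ≤ p.2) && decide (p.2 ≤ n))).map (fun p => (p.2, p.1))) (fun t => t.1)).filter (fun t => t.1 == c)).map (fun t => t.2)
      = pvAt pairs c := by
  rw [pvSorted_filter, List.filter_map, List.map_map]
  have hcomp : ((fun t : Int × pvRec => t.1 == c) ∘ fun p : pvRec × Int => (p.2, p.1))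
      = fun p : pvRec × Int => p.2 == c := rfl
  rw [hcomp, List.filter_filter]
  have : ∀ p ∈ pairs, ((p.2 == c) && (decide (0 ≤ p.2) && decide (p.2 ≤ n)))
      = (p.2 == c) := by
    intro p _
    by_cases hc : p.2 = c
    · simp [hc]; omega
    · simp [hc]
  rw [List.filter_congr this]
  rfl

lemma pvB_invalid (pairs : List (pvRec × Int)) (n : Int) :
    ((pairs.filter (fun p => !(decide (0 ≤ p.2) && decide (p.2 ≤ n)))).map (fun p => (p.2, p.1))).map (fun t => t.2)
      = (pairs.filter (fun p => decide (p.2 < 0) || decide (n < p.2))).map (fun p => p.1) := by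
  rw [List.map_map]
  have : ∀ p ∈ pairs, (!(decide (0 ≤ p.2) && decide (p.2 ≤ n)))
      = (decide (p.2 < 0) || decide (n < p.2)) := by
    intro p _
    by_cases h1 : (0:Int) ≤ p.2 <;> by_cases h2 : p.2 ≤ n <;> simp [h1, h2] <;> omega
  rw [List.filter_congr this]
  rfl


-- ===== VERDICT (by name: the statement is the Claim_ definition above) =====
theorem build_result_with_multiple_inserts_py_spec : Claim_equal_build_result_with_multiple_inserts_py := by
  intro base recs poss _dom
  unfold Spec_build_result_with_multiple_inserts_py
  show build_result_with_multiple_inserts_py base recs poss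
      = build_result_with_multiple_inserts_py_alt base recs poss
  simp only [build_result_with_multiple_inserts_py, build_result_with_multiple_inserts_py_alt]
  rw [pvB_fold]
  simp only [List.nil_append]
  rw [pvContains_if]
  have hbody : (fun (acc : List pvRec) (i : Int) =>
      (if (List.foldl (pvStepA (base.length : Int)) (PySem.Dict.empty, []) (recs.zip poss)).1.contains i = true then
          acc ++ (List.foldl (pvStepA (base.length : Int)) (PySem.Dict.empty, []) (recs.zip poss)).1.getD i []
        else acc) ++ [PySem.List.pyGetD base i []])
      = fun acc i => acc ++ ((List.foldl (pvStepA (base.length : Int)) (PySem.Dict.empty, []) (recs.zip poss)).1.getD i [] ++ [PySem.List.pyGetD base i []]) := by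
    funext acc i
    rw [pvContains_if, List.append_assoc]
  rw [hbody, PySem.List.pyRange_zero_natCast, List.foldl_map, PySem.List.foldl_append_eq_flatMap]
  simp only [List.nil_append]
  have hget : ∀ c : Int, 0 ≤ c → c ≤ (base.length : Int) →
      (List.foldl (pvStepA (base.length : Int)) (PySem.Dict.empty, []) (recs.zip poss)).1.getD c []
        = pvAt (recs.zip poss) c := by
    intro c h0 h1
    rw [pvA_getD _ _ _ c h0 h1]
    simp [PySem.Dict.getD, PySem.Dict.get?, PySem.Dict.empty]
  have hA : ∀ k ∈ List.range base.length,
      (List.foldl (pvStepA (base.length : Int)) (PySem.Dict.empty, []) (recs.zip poss)).1.getD (k : Int) []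
          ++ [PySem.List.pyGetD base (k : Int) []]
        = pvAt (recs.zip poss) (k : Int) ++ [base.getD k []] := by
    intro k hk
    have hk' : k < base.length := List.mem_range.mp hk
    rw [hget _ (Int.natCast_nonneg _) (by exact_mod_cast Nat.le_of_lt hk'), PySem.List.pyGetD_natCast]
  rw [List.flatMap_congr hA, pvA_snd, hget (base.length : Int) (Int.natCast_nonneg _) le_rfl]
  -- B side
  have hb : ∀ x ∈ PySem.List.sorted ((List.filter (fun p => decide (0 ≤ p.2) && decide (p.2 ≤ (base.length : Int))) (recs.zip poss)).map (fun p => (p.2, p.1))) (fun t => t.1),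
      (0 : Int) ≤ x.1 ∧ x.1 ≤ 0 + (base.length : Int) := by
    intro x hx
    rw [PySem.List.mem_sorted] at hx
    obtain ⟨p, hp, rfl⟩ := List.mem_map.mp hx
    have := (List.mem_filter.mp hp).2
    simp at this ⊢
    exact this
  rw [pvMerge_eq base _ 0 (PySem.List.sorted_pairwise _ _) hb]
  simp only [zero_add]
  have hB : ∀ k ∈ List.range base.length,
      ((PySem.List.sorted ((List.filter (fun p => decide (0 ≤ p.2) && decide (p.2 ≤ (base.length : Int))) (recs.zip poss)).map (fun p => (p.2, p.1))) (fun t => t.1)).filter (fun t => t.1 == (k : Int))).map (fun t => t.2)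
          ++ [base.getD k []]
        = pvAt (recs.zip poss) (k : Int) ++ [base.getD k []] := by
    intro k hk
    have hk' : k < base.length := List.mem_range.mp hk
    rw [pvB_filter_at _ _ _ (Int.natCast_nonneg _) (by exact_mod_cast Nat.le_of_lt hk')]
  rw [List.flatMap_congr hB,
    pvB_filter_at _ _ _ (Int.natCast_nonneg _) le_rfl, pvB_invalid]
  simp [List.append_assoc]
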